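-- pv_equiv track=rewrite | github.com/xode114kr1/algorithm-study | 프로그래머스/2/340211. ［PCCP 기출문제］ 3번 ／ 충돌위험 찾기/［PCCP 기출문제］ 3번 ／ 충돌위험 찾기.py | solution
-- ===== SOURCE A (Python) =====
-- from collections import defaultdict
--
-- def solution(points, routes):
--     len_routes = len(routes)
--     dic = defaultdict(int) # (x, y, time) : cnt
--
--     def save_move(start, end, time):
--         cur_x, cur_y = start
--         point_x, point_y = end
--         while 1:
--             move_x = (point_x - cur_x)
--             move_y = (point_y - cur_y)
--             if move_x != 0:
--                 # x좌표 차이가 있으면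
--                 cur_x += move_x  // abs(point_x - cur_x)
--             elif move_y != 0:
--                 # y좌표 차이가 있으면
--                 cur_y += move_y // abs(point_y - cur_y)
--             else:
--                 # 도착했으면
--                 return time
--             time += 1
--             dic[(cur_x, cur_y, time)] += 1
--
--
--
--     for route in routes:
--         dic[points[route[0] - 1][0], points[route[0] - 1][1], 0] += 1
--         time = 0
--         for i in range(1, len(route)):
--             start_x, start_y = points[route[i - 1] - 1]
--             end_x, end_y = points[route[i] - 1]
--             time = save_move((start_x, start_y), (end_x, end_y), time)
--
--     ans = 0
--     for key, val in dic.items():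
--         if val >= 2:
--             ans += 1
--     return ans
-- ===== SOURCE B (Python) =====
-- def solution(points, routes):
--     keys = []
--     for route in routes:
--         x, y = points[route[0] - 1][0], points[route[0] - 1][1]
--         t = 0
--         keys.append((x, y, 0))
--         for idx in route[1:]:
--             ex, ey = points[idx - 1]
--             dx, dy = abs(ex - x), abs(ey - y)
--             sx = 1 if x <= ex else -1
--             sy = 1 if y <= ey else -1
--             keys.extend((x + sx * i, y, t + i) for i in range(1, dx + 1))
--             keys.extend((ex, y + sy * j, t + dx + j) for j in range(1, dy + 1))
--             x, y, t = ex, ey, t + dx + dy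
--     keys.sort()
--     ans = 0
--     prev = None
--     run = 0
--     for k in keys:
--         if run > 0 and k == prev:
--             run += 1
--         else:
--             if run >= 2:
--                 ans += 1
--             prev, run = k, 1
--     if run >= 2:
--         ans += 1
--     return ans
-- ===== Notes on version B (the rewrite author's own statement) =====
-- stated objective: alternative
-- what changed: B computes each segment's cells by closed-form arithmetic over ranges (no unit-step while loop, no floordiv sign trick) into one flat list, then sorts that list and counts runs of length >= 2 in a single group scan, replacing A's incrementally-built (x,y,time)->count dict and its final items scan.
import Mathlib
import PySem

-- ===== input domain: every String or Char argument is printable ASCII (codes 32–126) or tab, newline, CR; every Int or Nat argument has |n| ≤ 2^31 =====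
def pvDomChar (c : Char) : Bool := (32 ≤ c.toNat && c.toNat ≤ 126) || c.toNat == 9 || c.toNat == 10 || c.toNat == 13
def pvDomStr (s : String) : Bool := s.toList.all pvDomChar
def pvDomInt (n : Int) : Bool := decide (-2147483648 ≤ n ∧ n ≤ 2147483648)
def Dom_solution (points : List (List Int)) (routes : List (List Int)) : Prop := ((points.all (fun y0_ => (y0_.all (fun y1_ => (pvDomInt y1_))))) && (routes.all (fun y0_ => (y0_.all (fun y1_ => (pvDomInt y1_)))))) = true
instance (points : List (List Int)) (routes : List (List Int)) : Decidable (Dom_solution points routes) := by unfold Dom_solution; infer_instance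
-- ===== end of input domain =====

-- B replaces A's unit-step simulation + (x,y,time)->count dict by closed-form range generation
-- of each segment's cells, a lexicographic sort and one run-length group scan; return values agree.

-- ===== PORT A =====

-- Python's inner helper save_move(start, end, time): the while-loop, step for step
-- (start/end pairs passed as components). The Nat fuel only makes the loop total:
-- one unit per iteration, and the loop runs exactly |px-cx| + |py-cy| times.
def saveMoveGo (fuel : Nat) (dic : PySem.Dict (Int × Int × Int) Int) (cx cy px py t : Int) :
    PySem.Dict (Int × Int × Int) Int × Int :=
  match fuel with
  | 0 => (dic, t)
  | fuel + 1 =>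
    if px - cx ≠ 0 then
      -- cur_x += move_x // abs(point_x - cur_x); time += 1; dic[(cur_x, cur_y, time)] += 1
      let cx' := cx + PySem.Int.floordiv (px - cx) |px - cx|
      saveMoveGo fuel (PySem.Dict.modify dic (cx', cy, t + 1) 0 (· + 1)) cx' cy px py (t + 1)
    else if py - cy ≠ 0 then
      let cy' := cy + PySem.Int.floordiv (py - cy) |py - cy|
      saveMoveGo fuel (PySem.Dict.modify dic (cx, cy', t + 1) 0 (· + 1)) cx cy' px py (t + 1)
    else (dic, t)

def saveMove (dic : PySem.Dict (Int × Int × Int) Int) (cx cy px py t : Int) :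
    PySem.Dict (Int × Int × Int) Int × Int :=
  saveMoveGo ((px - cx).natAbs + (py - cy).natAbs) dic cx cy px py t

-- body of 'for i in range(1, len(route))' (state = (dic, time))
def innerA (points : List (List Int)) (route : List Int)
    (a : PySem.Dict (Int × Int × Int) Int × Int) (i : Int) :
    PySem.Dict (Int × Int × Int) Int × Int :=
  -- start_x, start_y = points[route[i-1]-1]; end_x, end_y = points[route[i]-1]  (pairs under Pre_)
  let s := PySem.List.pyGetD points (PySem.List.pyGetD route (i - 1) 0 - 1) []
  let e := PySem.List.pyGetD points (PySem.List.pyGetD route i 0 - 1) []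
  saveMove a.1 (PySem.List.pyGetD s 0 0) (PySem.List.pyGetD s 1 0)
    (PySem.List.pyGetD e 0 0) (PySem.List.pyGetD e 1 0) a.2

def solution (points : List (List Int)) (routes : List (List Int)) : Int :=
  let dic :=
    routes.foldl (fun dic route =>
      -- dic[points[route[0]-1][0], points[route[0]-1][1], 0] += 1
      let dic := PySem.Dict.modify dic
        (PySem.List.pyGetD (PySem.List.pyGetD points (PySem.List.pyGetD route 0 0 - 1) []) 0 0,
         PySem.List.pyGetD (PySem.List.pyGetD points (PySem.List.pyGetD route 0 0 - 1) []) 1 0,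
         0) 0 (· + 1)
      -- time = 0; for i in range(1, len(route)): time = save_move(...)
      ((PySem.List.pyRange 1 (route.length : Int) 1).foldl (innerA points route) (dic, 0)).1)
      (PySem.Dict.empty)
  -- ans = 0; for key, val in dic.items(): if val >= 2: ans += 1
  dic.items.foldl (fun ans kv => if kv.2 ≥ 2 then ans + 1 else ans) 0

-- ===== PORT B =====

-- the two generator expressions: a segment's cells by closed-form arithmetic over ranges
def segKeysB (x y t ex ey : Int) : List (Int × Int × Int) :=
  let dx := |ex - x|
  let dy := |ey - y|
  let sx : Int := if x ≤ ex then 1 else -1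
  let sy : Int := if y ≤ ey then 1 else -1
  (PySem.List.pyRange 1 (dx + 1)).map (fun i => (x + sx * i, y, t + i))
    ++ (PySem.List.pyRange 1 (dy + 1)).map (fun j => (ex, y + sy * j, t + dx + j))

-- body of 'for idx in route[1:]' (state = (keys, x, y, t))
def innerB (points : List (List Int))
    (a : List (Int × Int × Int) × Int × Int × Int) (idx : Int) :
    List (Int × Int × Int) × Int × Int × Int :=
  -- ex, ey = points[idx - 1]  (a pair under Pre_)
  let q := PySem.List.pyGetD points (idx - 1) []
  let ex := PySem.List.pyGetD q 0 0
  let ey := PySem.List.pyGetD q 1 0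
  (a.1 ++ segKeysB a.2.1 a.2.2.1 a.2.2.2 ex ey,
   ex, ey, a.2.2.2 + |ex - a.2.1| + |ey - a.2.2.1|)

-- Python's keys.sort() compares the 3-tuples lexicographically; the lex order on the
-- product (toLex) is exactly that comparison, so this key is exact.
def keyB (k : Int × Int × Int) : Int ×ₗ (Int ×ₗ Int) := toLex (k.1, toLex k.2)

-- loop body of the final group scan (state = (prev, run, ans))
def stepB (st : Option (Int × Int × Int) × Int × Int) (k : Int × Int × Int) :
    Option (Int × Int × Int) × Int × Int :=
  if 0 < st.2.1 ∧ some k = st.1 then (st.1, st.2.1 + 1, st.2.2)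
  else (some k, 1, if 2 ≤ st.2.1 then st.2.2 + 1 else st.2.2)

def solution_alt (points : List (List Int)) (routes : List (List Int)) : Int :=
  let keys :=
    routes.foldl (fun keys route =>
      let x := PySem.List.pyGetD (PySem.List.pyGetD points (PySem.List.pyGetD route 0 0 - 1) []) 0 0
      let y := PySem.List.pyGetD (PySem.List.pyGetD points (PySem.List.pyGetD route 0 0 - 1) []) 1 0
      ((PySem.List.slice route (some 1) none).foldl (innerB points)
        (keys ++ [(x, y, 0)], x, y, 0)).1) []
  let s := PySem.List.sorted keys keyB false
  let r := s.foldl stepB (none, 0, 0)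
  if 2 ≤ r.2.1 then r.2.2 + 1 else r.2.2

-- ===== PRECONDITION & SPEC =====
-- Exactly the inputs on which A returns: every route nonempty, all its entries valid (possibly
-- negative) Python indices into points, its starting point with at least two coordinates, and —
-- when the route has a second stop, so points get tuple-unpacked — every visited point an exact pair.
def Pre_solution (points : List (List Int)) (routes : List (List Int)) : Prop :=
  ∀ r ∈ routes, r ≠ [] ∧ (∀ v ∈ r, PySem.Raise.InRange points.length (v - 1)) ∧
    2 ≤ (PySem.List.pyGetD points (PySem.List.pyGetD r 0 0 - 1) []).length ∧
    (1 < r.length → ∀ v ∈ r, (PySem.List.pyGetD points (v - 1) []).length = 2)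
instance (points : List (List Int)) (routes : List (List Int)) : Decidable (Pre_solution points routes) := by unfold Pre_solution; infer_instance

def pvWitness_solution : List (List Int) × List (List Int) := ([[0, 0], [2, 1]], [[1, 2], [2, 1]])

def Spec_solution (points : List (List Int)) (routes : List (List Int)) (out : Int) : Prop := out = solution_alt points routes
instance (points : List (List Int)) (routes : List (List Int)) (out : Int) : Decidable (Spec_solution points routes out) := by unfold Spec_solution; infer_instance

-- ===== CLAIM (what is proved, stated in full; the proofs are below) =====
def Claim_equal_solution : Prop := ∀ (points : List (List Int)) (routes : List (List Int)), Dom_solution points routes → Pre_solution points routes → Spec_solution points routes (solution points routes)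

-- ===== LEMMAS AND PROOFS =====

-- The shared abstraction: the stream of (x, y, time) cells both programs generate.

def pvIncr (d : PySem.Dict (Int × Int × Int) Int) (k : Int × Int × Int) :
    PySem.Dict (Int × Int × Int) Int :=
  PySem.Dict.modify d k 0 (· + 1)

def pvDist (a b : Int) : Int := ((a - b).natAbs : Int)

def xKeys (x ex y t : Int) : List (Int × Int × Int) :=
  if _ : x = ex then [] else
    let x' := x + (if x < ex then 1 else -1)
    (x', y, t + 1) :: xKeys x' ex y (t + 1)
termination_by (ex - x).natAbs
decreasing_by split <;> omega

def yKeys (y ey x t : Int) : List (Int × Int × Int) :=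
  if _ : y = ey then [] else
    let y' := y + (if y < ey then 1 else -1)
    (x, y', t + 1) :: yKeys y' ey x (t + 1)
termination_by (ey - y).natAbs
decreasing_by split <;> omega

def segKeys (x y ex ey t : Int) : List (Int × Int × Int) :=
  xKeys x ex y t ++ yKeys y ey ex (t + pvDist ex x)

def chainKeys (points : List (List Int)) (x y t : Int) : List Int → List (Int × Int × Int)
  | [] => []
  | idx :: rest =>
    let q := PySem.List.pyGetD points (idx - 1) []
    let ex := PySem.List.pyGetD q 0 0
    let ey := PySem.List.pyGetD q 1 0
    segKeys x y ex ey t ++ chainKeys points ex ey (t + pvDist ex x + pvDist ey y) rest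

def routeKeys (points : List (List Int)) (route : List Int) : List (Int × Int × Int) :=
  let p := PySem.List.pyGetD points (PySem.List.pyGetD route 0 0 - 1) []
  let x := PySem.List.pyGetD p 0 0
  let y := PySem.List.pyGetD p 1 0
  (x, y, 0) :: chainKeys points x y 0 (route.drop 1)

def allKeys (points : List (List Int)) (routes : List (List Int)) : List (Int × Int × Int) :=
  routes.flatMap (routeKeys points)

-- ---- A side ----

theorem pvDist_self (a : Int) : pvDist a a = 0 := by simp [pvDist]

theorem xKeys_self (x y t : Int) : xKeys x x y t = [] := by rw [xKeys]; simp

theorem yKeys_self (y x t : Int) : yKeys y y x t = [] := by rw [yKeys]; simp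

-- a // abs(a) is the sign of a (a ≠ 0)
theorem pv_floordiv_abs (a : Int) (h : a ≠ 0) :
    PySem.Int.floordiv a |a| = if 0 < a then 1 else -1 := by
  rcases lt_or_gt_of_ne h with hn | hp
  · rw [abs_of_neg hn, if_neg (by omega),
      PySem.Int.floordiv_eq_ediv_of_pos (by omega)]
    rw [show -a = -(a) by ring, Int.ediv_neg, Int.ediv_self (by omega)]
  · rw [abs_of_pos hp, if_pos hp,
      PySem.Int.floordiv_eq_ediv_of_pos hp, Int.ediv_self (by omega)]

theorem saveMoveGo_eq (fuel : Nat) : ∀ (dic : PySem.Dict (Int × Int × Int) Int) (cx cy px py t : Int),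
    fuel = (px - cx).natAbs + (py - cy).natAbs →
    saveMoveGo fuel dic cx cy px py t
      = ((segKeys cx cy px py t).foldl pvIncr dic, t + pvDist px cx + pvDist py cy) := by
  induction fuel with
  | zero =>
    intro dic cx cy px py t hf
    have hx : px = cx := by omega
    have hy : py = cy := by omega
    subst hx hy
    simp [saveMoveGo, segKeys, xKeys_self, yKeys_self, pvDist_self]
  | succ fuel ih =>
    intro dic cx cy px py t hf
    simp only [saveMoveGo]
    by_cases hx : px - cx ≠ 0
    · rw [if_pos hx]
      have he : cx + PySem.Int.floordiv (px - cx) |px - cx|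
          = cx + if cx < px then 1 else -1 := by
        rw [pv_floordiv_abs _ hx, if_congr (show (0 < px - cx) ↔ (cx < px) by omega) rfl rfl]
      show saveMoveGo fuel
          (PySem.Dict.modify dic (cx + PySem.Int.floordiv (px - cx) |px - cx|, cy, t + 1) 0 (· + 1))
          (cx + PySem.Int.floordiv (px - cx) |px - cx|) cy px py (t + 1) = _
      rw [he]
      rw [ih _ _ cy px py (t + 1) (by
        by_cases h : cx < px
        · rw [if_pos h]; omega
        · rw [if_neg h]; omega)]
      have ht : t + 1 + pvDist px (cx + if cx < px then 1 else -1) = t + pvDist px cx := by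
        by_cases h : cx < px
        · rw [if_pos h]; simp only [pvDist]; omega
        · rw [if_neg h]; simp only [pvDist]; omega
      simp only [segKeys]
      rw [ht]
      conv_rhs => rw [xKeys, dif_neg (show ¬ cx = px by omega)]
      simp only [List.cons_append, List.foldl_cons, pvIncr]
    · rw [if_neg hx]
      have hpx : px = cx := by omega
      subst hpx
      by_cases hy : py - cy ≠ 0
      · rw [if_pos hy]
        have he : cy + PySem.Int.floordiv (py - cy) |py - cy|
            = cy + if cy < py then 1 else -1 := by
          rw [pv_floordiv_abs _ hy, if_congr (show (0 < py - cy) ↔ (cy < py) by omega) rfl rfl]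
        show saveMoveGo fuel
            (PySem.Dict.modify dic (px, cy + PySem.Int.floordiv (py - cy) |py - cy|, t + 1) 0 (· + 1))
            px (cy + PySem.Int.floordiv (py - cy) |py - cy|) px py (t + 1) = _
        rw [he]
        rw [ih _ px _ px py (t + 1) (by
          by_cases h : cy < py
          · rw [if_pos h]; omega
          · rw [if_neg h]; omega)]
        have ht : t + 1 + pvDist py (cy + if cy < py then 1 else -1) = t + pvDist py cy := by
          by_cases h : cy < py
          · rw [if_pos h]; simp only [pvDist]; omega
          · rw [if_neg h]; simp only [pvDist]; omega
        simp only [segKeys, xKeys_self, List.nil_append, pvDist_self, add_zero]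
        rw [ht]
        conv_rhs => rw [yKeys, dif_neg (show ¬ cy = py by omega)]
        simp only [List.foldl_cons, pvIncr]
      · rw [if_neg hy]
        have hpy : py = cy := by omega
        subst hpy
        simp [segKeys, xKeys_self, yKeys_self, pvDist_self]

theorem saveMove_eq (dic : PySem.Dict (Int × Int × Int) Int) (cx cy px py t : Int) :
    saveMove dic cx cy px py t
      = ((segKeys cx cy px py t).foldl pvIncr dic, t + pvDist px cx + pvDist py cy) := by
  exact saveMoveGo_eq _ dic cx cy px py t rfl

theorem pyGetD_cons_shift (l : List Int) (v : Int) (k : Nat) :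
    PySem.List.pyGetD (v :: l) (((k + 1 : Nat) : Int)) 0 = PySem.List.pyGetD l (k : Int) 0 := by
  rw [PySem.List.pyGetD_natCast, PySem.List.pyGetD_natCast]
  simp

theorem A_shift (points : List (List Int)) (v0 : Int) (rest : List Int)
    (z : PySem.Dict (Int × Int × Int) Int × Int) :
    (PySem.List.pyRange 2 (((v0 :: rest).length : Nat) : Int) 1).foldl (innerA points (v0 :: rest)) z
    = (PySem.List.pyRange 1 ((rest.length : Nat) : Int) 1).foldl (innerA points rest) z := by
  rw [PySem.List.pyRange_one, PySem.List.pyRange_one]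
  have hm : ((((v0 :: rest).length : Nat) : Int) - 2).toNat = (((rest.length : Nat) : Int) - 1).toNat := by
    simp; omega
  rw [hm, List.foldl_map, List.foldl_map]
  apply PySem.List.foldl_congr_mem
  intro acc k _
  have h2 : (2 + (k : Int)) = (((k + 1) + 1 : Nat) : Int) := by push_cast; ring
  have h1 : (1 + (k : Int)) = (((k + 1 : Nat)) : Int) := by push_cast; ring
  simp only [innerA, h2, h1]
  rw [show ((((k+1)+1 : Nat) : Int) - 1) = (((k+1 : Nat)) : Int) by push_cast; ring,
      show ((((k+1) : Nat) : Int) - 1) = ((k : Nat) : Int) by push_cast; ring,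
      pyGetD_cons_shift, pyGetD_cons_shift]

theorem A_inner (points : List (List Int)) (v0 : Int) (rest : List Int)
    (dic : PySem.Dict (Int × Int × Int) Int) (t : Int) :
    ((PySem.List.pyRange 1 (((v0 :: rest).length : Nat) : Int) 1).foldl
        (innerA points (v0 :: rest)) (dic, t)).1
      = (chainKeys points
          (PySem.List.pyGetD (PySem.List.pyGetD points (v0 - 1) []) 0 0)
          (PySem.List.pyGetD (PySem.List.pyGetD points (v0 - 1) []) 1 0) t rest).foldl pvIncr dic := by
  induction rest generalizing v0 dic t with
  | nil => simp [chainKeys, PySem.List.pyRange_one_eq_nil]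
  | cons idx rest ih =>
    rw [PySem.List.pyRange_one_cons (by simp), List.foldl_cons]
    have hstep : innerA points (v0 :: idx :: rest) (dic, t) 1
        = saveMove dic
            (PySem.List.pyGetD (PySem.List.pyGetD points (v0 - 1) []) 0 0)
            (PySem.List.pyGetD (PySem.List.pyGetD points (v0 - 1) []) 1 0)
            (PySem.List.pyGetD (PySem.List.pyGetD points (idx - 1) []) 0 0)
            (PySem.List.pyGetD (PySem.List.pyGetD points (idx - 1) []) 1 0) t := by
      have h1 : PySem.List.pyGetD (v0 :: idx :: rest) (1 : Int) 0 = idx := by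
        rw [show (1 : Int) = ((1 : Nat) : Int) by simp, PySem.List.pyGetD_natCast]
        simp
      simp only [innerA, show (1 : Int) - 1 = 0 by norm_num, PySem.List.pyGetD_zero_cons, h1]
    rw [hstep, saveMove_eq, show (1 + 1 : Int) = 2 by norm_num, A_shift, ih, chainKeys]
    simp only [List.foldl_append]

theorem A_dict (points : List (List Int)) (routes : List (List Int)) :
    routes.foldl (fun dic route =>
      let dic := PySem.Dict.modify dic
        (PySem.List.pyGetD (PySem.List.pyGetD points (PySem.List.pyGetD route 0 0 - 1) []) 0 0,
         PySem.List.pyGetD (PySem.List.pyGetD points (PySem.List.pyGetD route 0 0 - 1) []) 1 0,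
         0) 0 (· + 1)
      ((PySem.List.pyRange 1 (route.length : Int) 1).foldl (innerA points route) (dic, 0)).1)
      PySem.Dict.empty
      = (allKeys points routes).foldl pvIncr PySem.Dict.empty := by
  simp only [allKeys]
  rw [List.foldl_flatMap]
  apply PySem.List.foldl_congr_mem
  intro dic route _
  cases route with
  | nil =>
    simp [routeKeys, chainKeys, PySem.List.pyRange_one_eq_nil, pvIncr]
  | cons v0 rest =>
    rw [A_inner]
    simp only [routeKeys, PySem.List.pyGetD_zero_cons, List.drop_succ_cons, List.drop_zero,
      List.foldl_cons, pvIncr]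

-- ---- B side: generated keys = allKeys ----

theorem xKeys_gen (d : Nat) : ∀ (x y t ex s : Int),
    ((s = 1 ∧ ex - x = (d : Int)) ∨ (s = -1 ∧ x - ex = (d : Int))) →
    xKeys x ex y t
      = (List.range d).map (fun (k : Nat) => (x + s * (1 + (k : Int)), y, t + (1 + (k : Int)))) := by
  induction d with
  | zero =>
    intro x y t ex s h
    have hx : x = ex := by omega
    subst hx
    simp [xKeys_self]
  | succ d ih =>
    intro x y t ex s h
    rw [List.range_succ_eq_map, List.map_cons, List.map_map]
    rcases h with ⟨hs, hd⟩ | ⟨hs, hd⟩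
    · subst hs
      rw [xKeys, dif_neg (show ¬ x = ex by omega), if_pos (show x < ex by omega)]
      show ((x + 1, y, t + 1) :: xKeys (x + 1) ex y (t + 1)) = _
      rw [ih (x + 1) y (t + 1) ex 1 (Or.inl ⟨rfl, by push_cast at hd; omega⟩)]
      refine congrArg₂ List.cons ?_ (List.map_congr_left (fun k _ => ?_))
      · norm_num [Prod.ext_iff]
      · simp only [Function.comp_apply, Prod.mk.injEq, true_and]
        omega
    · subst hs
      rw [xKeys, dif_neg (show ¬ x = ex by omega), if_neg (show ¬ x < ex by omega)]
      show ((x + -1, y, t + 1) :: xKeys (x + -1) ex y (t + 1)) = _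
      rw [ih (x + -1) y (t + 1) ex (-1) (Or.inr ⟨rfl, by push_cast at hd; omega⟩)]
      refine congrArg₂ List.cons ?_ (List.map_congr_left (fun k _ => ?_))
      · norm_num [Prod.ext_iff]
      · simp only [Function.comp_apply, Prod.mk.injEq, true_and]
        omega

theorem yKeys_gen (d : Nat) : ∀ (y x t ey s : Int),
    ((s = 1 ∧ ey - y = (d : Int)) ∨ (s = -1 ∧ y - ey = (d : Int))) →
    yKeys y ey x t
      = (List.range d).map (fun (k : Nat) => (x, y + s * (1 + (k : Int)), t + (1 + (k : Int)))) := by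
  induction d with
  | zero =>
    intro y x t ey s h
    have hy : y = ey := by omega
    subst hy
    simp [yKeys_self]
  | succ d ih =>
    intro y x t ey s h
    rw [List.range_succ_eq_map, List.map_cons, List.map_map]
    rcases h with ⟨hs, hd⟩ | ⟨hs, hd⟩
    · subst hs
      rw [yKeys, dif_neg (show ¬ y = ey by omega), if_pos (show y < ey by omega)]
      show ((x, y + 1, t + 1) :: yKeys (y + 1) ey x (t + 1)) = _
      rw [ih (y + 1) x (t + 1) ey 1 (Or.inl ⟨rfl, by push_cast at hd; omega⟩)]
      refine congrArg₂ List.cons ?_ (List.map_congr_left (fun k _ => ?_))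
      · norm_num [Prod.ext_iff]
      · simp only [Function.comp_apply, Prod.mk.injEq, true_and]
        omega
    · subst hs
      rw [yKeys, dif_neg (show ¬ y = ey by omega), if_neg (show ¬ y < ey by omega)]
      show ((x, y + -1, t + 1) :: yKeys (y + -1) ey x (t + 1)) = _
      rw [ih (y + -1) x (t + 1) ey (-1) (Or.inr ⟨rfl, by push_cast at hd; omega⟩)]
      refine congrArg₂ List.cons ?_ (List.map_congr_left (fun k _ => ?_))
      · norm_num [Prod.ext_iff]
      · simp only [Function.comp_apply, Prod.mk.injEq, true_and]
        omega

theorem pvDist_abs (a b : Int) : pvDist a b = |a - b| := by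
  simp [pvDist]

theorem segKeysB_eq (x y t ex ey : Int) : segKeysB x y t ex ey = segKeys x y ex ey t := by
  have hrange : ∀ (m : Nat), PySem.List.pyRange 1 ((m : Int) + 1)
      = (List.range m).map (fun (k : Nat) => 1 + (k : Int)) := by
    intro m
    rw [PySem.List.pyRange_one]
    congr 2
    omega
  simp only [segKeysB, segKeys]
  congr 1
  · rw [show |ex - x| = (((ex - x).natAbs : Nat) : Int) from (Int.natCast_natAbs _).symm,
      hrange, List.map_map]
    rw [xKeys_gen (ex - x).natAbs x y t ex (if x ≤ ex then 1 else -1)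
      (by split_ifs with hle <;> [exact Or.inl ⟨rfl, by omega⟩; exact Or.inr ⟨rfl, by omega⟩])]
    rfl
  · rw [show |ey - y| = (((ey - y).natAbs : Nat) : Int) from (Int.natCast_natAbs _).symm,
      hrange, List.map_map]
    rw [yKeys_gen (ey - y).natAbs y ex (t + pvDist ex x) ey (if y ≤ ey then 1 else -1)
      (by split_ifs with hle <;> [exact Or.inl ⟨rfl, by omega⟩; exact Or.inr ⟨rfl, by omega⟩])]
    rw [pvDist_abs]
    rfl

theorem B_chain (points : List (List Int)) (rest : List Int)
    (ks : List (Int × Int × Int)) (x y t : Int) :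
    (rest.foldl (innerB points) (ks, x, y, t)).1
      = ks ++ chainKeys points x y t rest := by
  induction rest generalizing ks x y t with
  | nil => simp [chainKeys]
  | cons idx rest ih =>
    simp only [List.foldl_cons, innerB, ih, chainKeys, segKeysB_eq, List.append_assoc,
      pvDist_abs]

theorem B_keys (points : List (List Int)) (routes : List (List Int)) :
    routes.foldl (fun keys route =>
      let x := PySem.List.pyGetD (PySem.List.pyGetD points (PySem.List.pyGetD route 0 0 - 1) []) 0 0
      let y := PySem.List.pyGetD (PySem.List.pyGetD points (PySem.List.pyGetD route 0 0 - 1) []) 1 0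
      ((PySem.List.slice route (some 1) none).foldl (innerB points)
        (keys ++ [(x, y, 0)], x, y, 0)).1) []
      = allKeys points routes := by
  simp only [allKeys]
  rw [show (routes.flatMap (routeKeys points)) = [] ++ routes.flatMap (routeKeys points) by simp,
    ← PySem.List.foldl_append_eq_flatMap (routeKeys points) routes []]
  apply PySem.List.foldl_congr_mem
  intro keys route _
  simp only [PySem.List.slice_from_one, B_chain, routeKeys, List.append_assoc]
  cases route with
  | nil => simp [chainKeys]
  | cons v0 rest => simp only [List.tail_cons, List.drop_succ_cons, List.drop_zero,
      List.singleton_append]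

-- ---- the group scan counts distinct duplicated cells ----

def finalB (st : Option (Int × Int × Int) × Int × Int) : Int :=
  if 2 ≤ st.2.1 then st.2.2 + 1 else st.2.2

theorem keyB_injective : Function.Injective keyB := by
  intro a b h
  cases a; cases b
  simpa [keyB, Prod.ext_iff] using h

theorem stepB_ans (L : List (Int × Int × Int)) :
    ∀ (p : Option (Int × Int × Int)) (r a c : Int),
    L.foldl stepB (p, r, a + c)
      = ((L.foldl stepB (p, r, a)).1, (L.foldl stepB (p, r, a)).2.1,
         (L.foldl stepB (p, r, a)).2.2 + c) := by
  induction L with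
  | nil => intro p r a c; rfl
  | cons k L ih =>
    intro p r a c
    simp only [List.foldl_cons, stepB]
    split_ifs with hc h2
    · exact ih p (r + 1) a c
    · rw [show a + c + 1 = (a + 1) + c by ring]
      exact ih (some k) 1 (a + 1) c
    · exact ih (some k) 1 a c

theorem stepB_replicate (m : Nat) (a : Int × Int × Int) :
    ∀ (r ans : Int), 0 < r →
    (List.replicate m a).foldl stepB (some a, r, ans) = (some a, r + (m : Int), ans) := by
  induction m with
  | zero => intro r ans _; simp
  | succ m ih =>
    intro r ans hr
    rw [List.replicate_succ, List.foldl_cons,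
      show stepB (some a, r, ans) a = (some a, r + 1, ans) by
        simp [stepB, hr],
      ih (r + 1) ans (by omega)]
    congr 2
    push_cast
    ring

theorem stepB_restart (R : List (Int × Int × Int)) (a : Int × Int × Int) (r ans : Int)
    (h : ∀ b, R.head? = some b → b ≠ a) :
    finalB (R.foldl stepB (some a, r, ans))
      = finalB (R.foldl stepB (none, 0, if 2 ≤ r then ans + 1 else ans)) := by
  cases R with
  | nil =>
    simp [finalB]
  | cons b T =>
    have hb : b ≠ a := h b rfl
    simp only [List.foldl_cons]
    rw [show stepB (some a, r, ans) b = (some b, 1, if 2 ≤ r then ans + 1 else ans) by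
        simp only [stepB]
        rw [if_neg (by simp [hb])],
      show stepB (none, 0, if 2 ≤ r then ans + 1 else ans)
          = fun b => (some b, 1, if 2 ≤ r then ans + 1 else ans) from rfl]

theorem finalB_offset (R : List (Int × Int × Int)) (c : Int) :
    finalB (R.foldl stepB (none, 0, c)) = finalB (R.foldl stepB (none, 0, 0)) + c := by
  have h := stepB_ans R none 0 0 c
  rw [zero_add] at h
  rw [h]
  simp only [finalB]
  split_ifs <;> ring

theorem group_count (n : Nat) : ∀ (S : List (Int × Int × Int)), S.length = n →
    S.Pairwise (fun a b => keyB a ≤ keyB b) →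
    finalB (S.foldl stepB (none, 0, 0))
      = ((PySem.Set.ofList S).countP (fun k => decide (2 ≤ S.count k)) : Int) := by
  induction n using Nat.strong_induction_on with
  | _ n ih =>
    intro S hlen hpw
    cases S with
    | nil => simp [finalB, PySem.Set.ofList]
    | cons a rest =>
      -- split rest into the run of a's and the remainder R
      set p : Int × Int × Int → Bool := fun x => decide (x = a) with hp
      set m := rest.takeWhile p with hmdef
      set R := rest.dropWhile p with hRdef
      have hsplit : rest = m ++ R := (List.takeWhile_append_dropWhile).symm
      have hma : ∀ x ∈ m, x = a := by
        intro x hx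
        have := List.mem_takeWhile_imp (hmdef ▸ hx)
        simpa [hp] using this
      have hrepl : m = List.replicate m.length a := List.eq_replicate_of_mem hma
      rcases List.pairwise_cons.mp hpw with ⟨hhead, hrest⟩
      have hpwR : R.Pairwise (fun a b => keyB a ≤ keyB b) :=
        ((List.pairwise_append.mp (hsplit ▸ hrest)).2).1
      have hbR : ∀ b, R.head? = some b → b ≠ a := by
        intro b hhd
        have := List.head?_dropWhile_not p rest
        rw [← hRdef, hhd] at this
        simpa [hp] using this
      have hnotinR : a ∉ R := by
        cases hR : R with
        | nil => simp
        | cons b T =>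
          have hb : b ≠ a := hbR b (by rw [hR]; rfl)
          have hmemb : b ∈ rest := by
            rw [hsplit, hR]; exact List.mem_append_right _ (List.mem_cons_self ..)
          have hab : keyB a < keyB b :=
            lt_of_le_of_ne (hhead b hmemb) (fun hE => hb (keyB_injective hE.symm))
          intro hmem
          rcases List.mem_cons.mp hmem with hE | hT
          · exact hb hE.symm
          · have hbc : keyB b ≤ keyB a :=
              (List.pairwise_cons.mp (hR ▸ hpwR)).1 a hT
            exact absurd (lt_of_lt_of_le hab hbc) (lt_irrefl _)
      have hcount_m : m.count a = m.length := by
        conv_lhs => rw [hrepl]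
        exact List.count_replicate_self
      have hcount_R : R.count a = 0 := List.count_eq_zero.mpr hnotinR
      have hcount_a : (a :: rest).count a = m.length + 1 := by
        rw [List.count_cons_self, hsplit, List.count_append, hcount_m, hcount_R]
      have hcount_k : ∀ k ∈ R, (a :: rest).count k = R.count k := by
        intro k hk
        have hka : k ≠ a := fun hE => hnotinR (hE ▸ hk)
        have hkm : k ∉ m := fun hkm => hka (hma k hkm)
        rw [List.count_cons_of_ne hka.symm, hsplit, List.count_append,
          List.count_eq_zero.mpr hkm, Nat.zero_add]
      -- the left-hand fold
      have hstep0 : stepB (none, 0, 0) a = (some a, 1, 0) := by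
        simp [stepB]
      have hfold : finalB ((a :: rest).foldl stepB (none, 0, 0))
          = finalB (R.foldl stepB (none, 0, 0))
            + (if 2 ≤ 1 + (m.length : Int) then 1 else 0) := by
        rw [List.foldl_cons, hstep0]
        conv_lhs => rw [hsplit, List.foldl_append, hrepl,
          stepB_replicate m.length a 1 0 (by omega)]
        rw [stepB_restart _ _ _ _ hbR]
        rw [show (if 2 ≤ 1 + (m.length : Int) then (0 : Int) + 1 else 0)
            = if 2 ≤ 1 + (m.length : Int) then (1 : Int) else 0 by split_ifs <;> ring]
        exact finalB_offset R _
      -- the right-hand count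
      have hRlen : R.length < n := by
        have : rest.length = m.length + R.length := by rw [hsplit, List.length_append]
        simp only [List.length_cons] at hlen
        omega
      have hih := ih R.length hRlen R rfl hpwR
      have hperm : (PySem.Set.ofList (a :: rest)).Perm (a :: PySem.Set.ofList R) := by
        rw [List.perm_ext_iff_of_nodup (PySem.Set.nodup_ofList _)
          (by
            refine List.nodup_cons.mpr ⟨?_, PySem.Set.nodup_ofList _⟩
            rw [PySem.Set.mem_ofList]
            exact hnotinR)]
        intro x
        rw [PySem.Set.mem_ofList, List.mem_cons, List.mem_cons, PySem.Set.mem_ofList,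
          hsplit, List.mem_append]
        constructor
        · rintro (hE | hm | hR)
          · exact Or.inl hE
          · exact Or.inl (hma x hm)
          · exact Or.inr hR
        · rintro (hE | hR)
          · exact Or.inl hE
          · exact Or.inr (Or.inr hR)
      have hcountP : (PySem.Set.ofList (a :: rest)).countP
            (fun k => decide (2 ≤ (a :: rest).count k))
          = (if 2 ≤ m.length + 1 then 1 else 0)
            + (PySem.Set.ofList R).countP (fun k => decide (2 ≤ R.count k)) := by
        rw [hperm.countP_eq, List.countP_cons]
        have hcongr : (PySem.Set.ofList R).countP (fun k => decide (2 ≤ (a :: rest).count k))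
            = (PySem.Set.ofList R).countP (fun k => decide (2 ≤ R.count k)) := by
          apply List.countP_congr
          intro x hx
          rw [hcount_k x ((PySem.Set.mem_ofList _ _).mp hx)]
        rw [hcongr, hcount_a, Nat.add_comm]
        congr 1
        simp
      rw [hfold, hih, hcountP]
      push_cast
      split_ifs <;> push_cast <;> omega

-- ---- counting: A's dict scan = B's group scan over the sorted keys ----

theorem count_eq (L : List (Int × Int × Int)) :
    ((L.foldl pvIncr PySem.Dict.empty).items.foldl
        (fun ans kv => if kv.2 ≥ 2 then ans + 1 else ans) (0 : Int))
      = (let s := PySem.List.sorted L keyB false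
         let r := s.foldl stepB (none, 0, 0)
         if 2 ≤ r.2.1 then r.2.2 + 1 else r.2.2) := by
  have h1 : L.foldl pvIncr PySem.Dict.empty = PySem.Dict.counter L := by
    rw [PySem.Dict.counter_eq_foldl]; rfl
  rw [h1, PySem.Dict.items_counter, PySem.List.foldl_ite_add_one, List.countP_map]
  show _ = finalB ((PySem.List.sorted L keyB false).foldl stepB (none, 0, 0))
  set S := PySem.List.sorted L keyB false with hSdef
  have hperm : S.Perm L := PySem.List.sorted_perm L keyB false
  rw [group_count S.length S rfl (PySem.List.sorted_pairwise L keyB)]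
  have hsets : (PySem.Set.ofList S).Perm (PySem.Set.ofList L) := by
    rw [List.perm_ext_iff_of_nodup (PySem.Set.nodup_ofList _) (PySem.Set.nodup_ofList _)]
    intro x
    rw [PySem.Set.mem_ofList, PySem.Set.mem_ofList]
    exact hperm.mem_iff
  rw [show (PySem.Set.ofList S).countP (fun k => decide (2 ≤ S.count k))
      = (PySem.Set.ofList L).countP
          ((fun kv => decide (kv.2 ≥ 2)) ∘ (fun k => (k, (L.count k : Int)))) by
    rw [← hsets.countP_eq]
    apply List.countP_congr
    intro x _
    simp only [Function.comp_apply, ge_iff_le, decide_eq_true_eq]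
    rw [hperm.count_eq]
    constructor
    · intro hx; exact_mod_cast hx
    · intro hx; exact_mod_cast hx]
  rw [zero_add]

-- ===== VERDICT (by name: the statement is the Claim_ definition above) =====
theorem solution_spec : Claim_equal_solution := by
  intro points routes _ _
  unfold Spec_solution solution solution_alt
  rw [A_dict, B_keys, count_eq]
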